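-- pv_equiv track=rewrite | github.com/ojus1/InsanelyFastStringQuantization | InsanelyFastStringQuantization/string_hasher.py | extractWordSet
-- ===== SOURCE A (Python) =====
-- def extractWordSet(text, num_bits, codetable):
--     text = text.lower().encode('utf-8')
--     vec = [0] * num_bits
--     wordhash = 0
--     for ch in text:
--         code = codetable[ch]
--         if code != 0:
--             wordhash = (wordhash>>1) + code
--         else:
--             if wordhash != 0:
--                 vec[wordhash % num_bits] = 1
--                 wordhash = 0
--     return vec
-- ===== SOURCE B (Python) =====
-- def extractWordSet(text, num_bits, codetable):
--     codes = [codetable[b] for b in text.lower().encode('utf-8')]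
--     # split into tokens at zero codes; the run after the last zero is
--     # deliberately not a token (the scanner never finalizes it)
--     tokens = []
--     cur = []
--     for c in codes:
--         if c == 0:
--             tokens.append(cur)
--             cur = []
--         else:
--             cur.append(c)
--     bits = set()
--     for tok in tokens:
--         h = 0
--         for c in tok:
--             h = (h >> 1) + c
--         if h:
--             bits.add(h % num_bits)
--     return [1 if i in bits else 0 for i in range(num_bits)]
-- ===== Notes on version B (the rewrite author's own statement) =====
-- stated objective: alternative
-- what changed: A streams bytes through one mutable (vec, wordhash) state machine; B first tokenizes the code sequence at zero codes (dropping the never-finalized trailing run), hashes each token, collects the bit positions in a set, and builds the output vector back-to-front as a comprehension over range(num_bits).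
-- outside the precondition, e.g. on extractWordSet('\t\n\r', 0, [0, 0, 0, 0, 0, 0, 0, 0, 0, 2, -1, 0, 0, 0]): A returns [], B returns []
import Mathlib
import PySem

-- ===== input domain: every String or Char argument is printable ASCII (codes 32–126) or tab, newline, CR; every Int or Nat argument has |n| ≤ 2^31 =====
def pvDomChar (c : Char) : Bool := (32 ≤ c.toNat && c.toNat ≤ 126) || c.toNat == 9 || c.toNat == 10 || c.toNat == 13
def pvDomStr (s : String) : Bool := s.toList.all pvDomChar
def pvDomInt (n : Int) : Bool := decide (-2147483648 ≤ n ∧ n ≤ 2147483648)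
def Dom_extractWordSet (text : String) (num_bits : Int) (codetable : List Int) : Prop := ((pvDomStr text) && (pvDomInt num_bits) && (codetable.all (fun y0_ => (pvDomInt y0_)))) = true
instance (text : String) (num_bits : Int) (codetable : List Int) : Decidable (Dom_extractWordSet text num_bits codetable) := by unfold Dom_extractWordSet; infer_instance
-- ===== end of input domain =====

-- B re-decomposes A's streaming state machine as tokenize-at-zeros / hash-each-token /
-- set-of-bits / comprehension over range(num_bits); same cost, proved equal on Pre_.

-- ===== PORT A =====
-- text.lower().encode('utf-8'): on the ASCII domain the byte values are exactly the
-- char codes of the lowered string (exact on Dom_).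
def extractWordSet (text : String) (num_bits : Int) (codetable : List Int) : List Int :=
  let bytes : List Int := (PySem.Str.lower text).toList.map (fun c => (c.toNat : Int))
  let res := bytes.foldl (fun (st : List Int × Int) ch =>
      let code := PySem.List.pyGetD codetable ch 0      -- codetable[ch]; in range under Pre_
      if code ≠ 0 then
        (st.1, PySem.Int.floordiv st.2 2 + code)        -- wordhash >> 1 is floor division by 2 (exact)
      else if st.2 ≠ 0 then
        (PySem.List.pySetD st.1 (PySem.Int.mod st.2 num_bits) 1, 0)  -- vec[wordhash % num_bits] = 1; in range under Pre_
      else st)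
    (PySem.List.pyRepeat [0] num_bits, 0)               -- [0] * num_bits
  res.1

-- ===== PORT B =====
def extractWordSet_alt (text : String) (num_bits : Int) (codetable : List Int) : List Int :=
  let codes : List Int := (PySem.Str.lower text).toList.map
      (fun c => PySem.List.pyGetD codetable ((c.toNat : Int)) 0)
  -- split into tokens at zero codes; the trailing run is deliberately not a token
  let tc := codes.foldl (fun (acc : List (List Int) × List Int) c =>
      if c == 0 then (acc.1 ++ [acc.2], ([] : List Int)) else (acc.1, acc.2 ++ [c])) ([], [])
  let bits : PySem.Set Int := tc.1.foldl (fun (s : PySem.Set Int) tok =>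
      let h := tok.foldl (fun h c => PySem.Int.floordiv h 2 + c) 0
      if h ≠ 0 then PySem.Set.add s (PySem.Int.mod h num_bits) else s) PySem.Set.empty
  (PySem.List.pyRange 0 num_bits 1).map (fun i => if PySem.Set.contains bits i then 1 else 0)

-- ===== PRECONDITION & SPEC =====
-- Pre_ excludes lowered bytes that do not index into codetable (IndexError in A's lookup)
-- and, for num_bits <= 0 only, texts containing a terminated word (a nonzero code followed
-- by a later zero code): there A raises ZeroDivisionError/IndexError at the bit-set whenever
-- such a word's hash is nonzero; on the rare excluded inputs where every terminated word
-- hashes to 0, A returns [] and B returns [] too.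
def Pre_extractWordSet (text : String) (num_bits : Int) (codetable : List Int) : Prop :=
  (1 ≤ num_bits ∨
    ((((PySem.Chars.lower text.toList).map
        (fun c => PySem.List.pyGetD codetable ((c.toNat : Int)) 0)).dropWhile
        (fun c => c == 0)).all (fun c => decide (c ≠ 0)) = true)) ∧
    ((PySem.Chars.lower text.toList).all (fun c => decide (c.toNat < codetable.length)) = true)
instance (text : String) (num_bits : Int) (codetable : List Int) : Decidable (Pre_extractWordSet text num_bits codetable) := by unfold Pre_extractWordSet; infer_instance

def pvWitness_extractWordSet : String × Int × List Int :=
  ("ab", 2, [0,0,0,0,0,0,0,0,0,0,0,0,0,0,0,0,0,0,0,0,0,0,0,0,0,0,0,0,0,0,0,0,0,0,0,0,0,0,0,0,0,0,0,0,0,0,0,0,0,0,0,0,0,0,0,0,0,0,0,0,0,0,0,0,0,0,0,0,0,0,0,0,0,0,0,0,0,0,0,0,0,0,0,0,0,0,0,0,0,0,0,0,0,0,0,0,0,1,1])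

def Spec_extractWordSet (text : String) (num_bits : Int) (codetable : List Int) (out : List Int) : Prop := out = extractWordSet_alt text num_bits codetable
instance (text : String) (num_bits : Int) (codetable : List Int) (out : List Int) : Decidable (Spec_extractWordSet text num_bits codetable out) := by unfold Spec_extractWordSet; infer_instance

-- ===== CLAIM (what is proved, stated in full; the proofs are below) =====
def Claim_equal_extractWordSet : Prop := ∀ (text : String) (num_bits : Int) (codetable : List Int), Dom_extractWordSet text num_bits codetable → Pre_extractWordSet text num_bits codetable → Spec_extractWordSet text num_bits codetable (extractWordSet text num_bits codetable)

-- ===== LEMMAS AND PROOFS =====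

-- A's loop body, over the already-looked-up code sequence
def pvStepA (nb : Int) (st : List Int × Int) (code : Int) : List Int × Int :=
  if code ≠ 0 then (st.1, PySem.Int.floordiv st.2 2 + code)
  else if st.2 ≠ 0 then (PySem.List.pySetD st.1 (PySem.Int.mod st.2 nb) 1, 0)
  else st

-- B's tokenizer step and per-token bit step
def pvStepT (acc : List (List Int) × List Int) (c : Int) : List (List Int) × List Int :=
  if c == 0 then (acc.1 ++ [acc.2], ([] : List Int)) else (acc.1, acc.2 ++ [c])

def pvTokHash (tok : List Int) : Int :=
  tok.foldl (fun h c => PySem.Int.floordiv h 2 + c) 0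

def pvStepS (nb : Int) (s : PySem.Set Int) (tok : List Int) : PySem.Set Int :=
  if pvTokHash tok ≠ 0 then PySem.Set.add s (PySem.Int.mod (pvTokHash tok) nb) else s

-- reference streaming membership: does A's scan of `cs` (current hash h) ever set bit j?
def pvHit (nb h : Int) (cs : List Int) (j : Int) : Bool :=
  match cs with
  | [] => false
  | c :: rest =>
    if c ≠ 0 then pvHit nb (PySem.Int.floordiv h 2 + c) rest j
    else if h ≠ 0 then (PySem.Int.mod h nb == j) || pvHit nb 0 rest j
    else pvHit nb 0 rest j

theorem pvA_eq (text : String) (nb : Int) (ct : List Int) :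
    extractWordSet text nb ct =
      (((PySem.Str.lower text).toList.map
          (fun c => PySem.List.pyGetD ct ((c.toNat : Int)) 0)).foldl (pvStepA nb)
        (List.replicate nb.toNat 0, 0)).1 := by
  simp only [extractWordSet, List.foldl_map, pvStepA, PySem.List.pyRepeat_singleton]

theorem pvB_eq (text : String) (nb : Int) (ct : List Int) :
    extractWordSet_alt text nb ct =
      (PySem.List.pyRange 0 nb 1).map (fun i =>
        if PySem.Set.contains
            (((((PySem.Str.lower text).toList.map
                (fun c => PySem.List.pyGetD ct ((c.toNat : Int)) 0)).foldl pvStepT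
                ([], [])).1).foldl (pvStepS nb) PySem.Set.empty) i
        then 1 else 0) := rfl

theorem pv_lenA (nb : Int) (cs : List Int) (st : List Int × Int) :
    ((cs.foldl (pvStepA nb) st).1).length = st.1.length := by
  induction cs generalizing st with
  | nil => rfl
  | cons c rest ih =>
    simp only [List.foldl_cons]
    rw [ih]
    simp only [pvStepA]
    split_ifs <;> simp [PySem.List.length_pySetD]

theorem pv_getA (nb : Int) (cs : List Int) (vec : List Int) (h : Int)
    (hlen : vec.length = nb.toNat) (j : Nat) (hj : j < nb.toNat) :
    ((cs.foldl (pvStepA nb) (vec, h)).1).getD j 0 =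
      if pvHit nb h cs (j : Int) then 1 else vec.getD j 0 := by
  induction cs generalizing vec h with
  | nil => simp [pvHit]
  | cons c rest ih =>
    simp only [List.foldl_cons, pvStepA, pvHit]
    by_cases hc : c ≠ 0
    · simp only [if_pos hc]
      exact ih vec _ hlen
    · simp only [if_neg hc]
      by_cases hh : h ≠ 0
      · simp only [if_pos hh]
        have h0 : (0:Int) < nb := by omega
        have hm0 : 0 ≤ PySem.Int.mod h nb := PySem.Int.mod_nonneg h h0
        have hmlt : PySem.Int.mod h nb < nb := PySem.Int.mod_lt h h0
        rw [PySem.List.pySetD_of_nonneg vec 1 hm0, ih _ _ (by simp [hlen])]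
        have hgs : (vec.set (PySem.Int.mod h nb).toNat 1).getD j 0 =
            if (PySem.Int.mod h nb == (j : Int)) then 1 else vec.getD j 0 := by
          by_cases he : PySem.Int.mod h nb = (j : Int)
          · have hjj : (PySem.Int.mod h nb).toNat = j := by omega
            rw [List.getD_eq_getElem?_getD, hjj,
              List.getElem?_set_self (by omega : j < vec.length)]
            simp [he]
          · have hne : (PySem.Int.mod h nb).toNat ≠ j := by omega
            rw [List.getD_eq_getElem?_getD, List.getElem?_set_ne hne,
              ← List.getD_eq_getElem?_getD]
            simp [he]
        rw [hgs]
        rcases Bool.eq_false_or_eq_true (pvHit nb 0 rest (j : Int)) with hr | hr <;>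
          rcases Bool.eq_false_or_eq_true (PySem.Int.mod h nb == (j : Int)) with hm | hm <;>
          simp [hr, hm]
      · simp only [if_neg hh]
        simp only [not_not] at hh
        subst hh
        exact ih vec 0 hlen

theorem pv_containsFold (nb : Int) (toks : List (List Int)) (s : PySem.Set Int) (j : Int) :
    PySem.Set.contains (toks.foldl (pvStepS nb) s) j =
      (PySem.Set.contains s j ||
        toks.any (fun t => pvTokHash t ≠ 0 && (PySem.Int.mod (pvTokHash t) nb == j))) := by
  induction toks generalizing s with
  | nil => simp
  | cons t rest ih =>
    have hadd : ∀ (x : Int), PySem.Set.contains (PySem.Set.add s x) j =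
        (PySem.Set.contains s j || (x == j)) := by
      intro x
      rw [Bool.eq_iff_iff]
      simp only [Bool.or_eq_true, beq_iff_eq, PySem.Set.contains_iff, PySem.Set.mem_add]
      constructor <;> rintro (h | h) <;> simp [h]
    by_cases ht : pvTokHash t ≠ 0
    · simp only [List.foldl_cons, List.any_cons, pvStepS, if_pos ht, ih, hadd,
        decide_eq_true ht, Bool.true_and]
      rcases Bool.eq_false_or_eq_true (PySem.Set.contains s j) with h1 | h1 <;>
        rcases Bool.eq_false_or_eq_true (PySem.Int.mod (pvTokHash t) nb == j) with h2 | h2 <;>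
        simp [h2]
    · simp only [not_not] at ht
      simp only [List.foldl_cons, List.any_cons, pvStepS, ht,
        if_neg (by simp : ¬ ((0:Int) ≠ 0)), ih]
      simp

theorem pv_tokShift (cs : List Int) (T : List (List Int)) (cur : List Int) :
    cs.foldl pvStepT (T, cur) =
      (T ++ (cs.foldl pvStepT ([], cur)).1, (cs.foldl pvStepT ([], cur)).2) := by
  induction cs generalizing T cur with
  | nil => simp
  | cons c rest ih =>
    simp only [List.foldl_cons, pvStepT]
    by_cases hc : c = 0
    · simp only [hc, BEq.rfl, if_true, List.nil_append]
      rw [ih (T ++ [cur]) [], ih [cur] []]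
      simp [List.append_assoc]
    · have hb : (c == 0) = false := by simp [hc]
      simp only [hb, Bool.false_eq_true, if_false]
      exact ih T (cur ++ [c])

theorem pv_tokHash_append (cur : List Int) (c : Int) :
    pvTokHash (cur ++ [c]) = PySem.Int.floordiv (pvTokHash cur) 2 + c := by
  simp [pvTokHash, List.foldl_append]

theorem pv_hit_eq_tokens (nb : Int) (cs : List Int) (cur : List Int) (j : Int) :
    pvHit nb (pvTokHash cur) cs j =
      ((cs.foldl pvStepT ([], cur)).1).any
        (fun t => pvTokHash t ≠ 0 && (PySem.Int.mod (pvTokHash t) nb == j)) := by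
  induction cs generalizing cur with
  | nil => simp [pvHit]
  | cons c rest ih =>
    simp only [List.foldl_cons, pvStepT, pvHit]
    by_cases hc : c = 0
    · simp only [hc, BEq.rfl, if_true, if_neg (by simp : ¬ (0:Int) ≠ 0), List.nil_append]
      rw [pv_tokShift rest [cur] []]
      have h0 : pvHit nb 0 rest j =
          ((rest.foldl pvStepT ([], [])).1).any
            (fun t => pvTokHash t ≠ 0 && (PySem.Int.mod (pvTokHash t) nb == j)) := ih []
      by_cases hh : pvTokHash cur ≠ 0
      · simp only [if_pos hh, h0]
        simp [hh]
      · simp only [if_neg hh]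
        simp only [not_not] at hh
        simp [h0, hh]
    · have hb : (c == 0) = false := by simp [hc]
      simp only [hb, Bool.false_eq_true, if_false, if_pos hc]
      rw [← pv_tokHash_append, ih]

-- ===== VERDICT (by name: the statement is the Claim_ definition above) =====
theorem extractWordSet_spec : Claim_equal_extractWordSet := by
  intro text nb ct _hdom hpre
  unfold Spec_extractWordSet
  obtain ⟨_hnb', _hct⟩ := hpre
  by_cases hnb : 1 ≤ nb
  · rw [pvA_eq, pvB_eq]
    set cs : List Int :=
      (PySem.Str.lower text).toList.map (fun c => PySem.List.pyGetD ct ((c.toNat : Int)) 0) with hcs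
    have hlenA : ((cs.foldl (pvStepA nb) (List.replicate nb.toNat 0, 0)).1).length = nb.toNat := by
      rw [pv_lenA]; simp
    have hlenB : ((PySem.List.pyRange 0 nb 1).map (fun i =>
        if PySem.Set.contains (((cs.foldl pvStepT ([], [])).1).foldl (pvStepS nb) PySem.Set.empty) i
        then (1:Int) else 0)).length = nb.toNat := by
      simp [PySem.List.length_pyRange_one]
    apply List.ext_getElem (by rw [hlenA, hlenB])
    intro i h1 h2
    have hi : i < nb.toNat := by rwa [hlenA] at h1
    have hA : ((cs.foldl (pvStepA nb) (List.replicate nb.toNat 0, 0)).1)[i] =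
        ((cs.foldl (pvStepA nb) (List.replicate nb.toNat 0, 0)).1).getD i 0 := by
      rw [List.getD_eq_getElem _ _ h1]
    rw [hA, pv_getA nb cs _ 0 (by simp) i hi]
    rw [List.getElem_map]
    rw [show (PySem.List.pyRange 0 nb 1)[i]'(by simpa [PySem.List.length_pyRange_one] using h2) =
        (0 : Int) + (i : Int) from PySem.List.getElem_pyRange_one _ _ _ _]
    rw [pv_containsFold]
    have hhit : pvHit nb 0 cs (i : Int) =
        ((cs.foldl pvStepT ([], [])).1).any
          (fun t => pvTokHash t ≠ 0 && (PySem.Int.mod (pvTokHash t) nb == (i : Int))) :=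
      pv_hit_eq_tokens nb cs [] (i : Int)
    simp only [zero_add]
    rw [← hhit]
    simp [List.getD_eq_getElem?_getD, hi, PySem.Set.empty]
  · -- num_bits ≤ 0: both sides are the empty vector
    have ha : extractWordSet text nb ct = [] := by
      rw [pvA_eq]
      apply List.eq_nil_of_length_eq_zero
      rw [pv_lenA]
      simp [Int.toNat_of_nonpos (by omega : nb ≤ 0)]
    have hb : extractWordSet_alt text nb ct = [] := by
      rw [pvB_eq, PySem.List.pyRange_one_eq_nil (by omega : nb ≤ 0)]
      simp
    rw [ha, hb]
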